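-- pv_equiv track=rewrite | github.com/ThanosSpin/trading-bot | model_xgb.py | find_matching_feature
-- ===== SOURCE A (Python) =====
-- def find_matching_feature(feature_name: str, available_features: list) -> str:
--     """
--     Case-insensitive feature matching with intelligent fallbacks.
--     Handles version drift between trained models and current feature sets.
--
--     Args:
--         feature_name: Target feature from trained model (e.g., "RSI_14")
--         available_features: List of features in current dataframe
--
--     Returns:
--         Matched feature name from available_features, or None if no match
--     """
--     if not feature_name or not available_features:
--         return None
--
--     feature_lower = str(feature_name).lower().strip()
--
--     # STAGE 1: Exact match (case-insensitive)
--     for feat in available_features: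
--         if str(feat).lower().strip() == feature_lower:
--             return feat
--
--     # STAGE 2: Normalized match (remove underscores/spaces)
--     feature_normalized = feature_lower.replace("_", "").replace(" ", "")
--
--     for feat in available_features:
--         feat_normalized = str(feat).lower().strip().replace("_", "").replace(" ", "")
--         if feature_normalized == feat_normalized:
--             return feat
--
--     # STAGE 3: Partial match (substring)
--     for feat in available_features:
--         feat_lower = str(feat).lower().strip()
--         if feature_lower in feat_lower or feat_lower in feature_lower:
--             if feature_lower in feat_lower:
--                 return feat
--
--     # STAGE 4: Token-based match (split by underscore)
--     feature_tokens = set(feature_lower.split("_"))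
--     best_match = None
--     best_score = 0
--
--     for feat in available_features:
--         feat_tokens = set(str(feat).lower().strip().split("_"))
--         common = feature_tokens & feat_tokens
--         score = len(common)
--
--         if score > best_score and score >= 2:
--             best_score = score
--             best_match = feat
--
--     if best_match:
--         return best_match
--
--     # STAGE 5: No match found
--     return None
-- ===== SOURCE B (Python) =====
-- def find_matching_feature(feature_name: str, available_features: list) -> str:
--     """Single scored pass: each candidate gets its best tier (1 exact, 2 normalized,
--     3 substring, 4 token overlap >= 2); keep the best (tier, -score) seen, earliest wins ties."""
--     if not feature_name or not available_features:
--         return None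
--     target = str(feature_name).lower().strip()
--     target_norm = target.replace("_", "").replace(" ", "")
--     target_tokens = set(target.split("_"))
--     best = None  # (tier, key, feat)
--     for feat in available_features:
--         fl = str(feat).lower().strip()
--         if fl == target:
--             rank = (1, 0)
--         elif fl.replace("_", "").replace(" ", "") == target_norm:
--             rank = (2, 0)
--         elif target in fl:
--             rank = (3, 0)
--         else:
--             score = len(target_tokens & set(fl.split("_")))
--             if score < 2:
--                 continue
--             rank = (4, -score)
--         if best is None or rank < best[0]:
--             best = (rank, feat)
--     return best[1] if best else None
-- ===== Notes on version B (the rewrite author's own statement) =====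
-- stated objective: alternative
-- what changed: A's five sequential early-return scans over available_features are replaced by a single pass that assigns each candidate a match tier (1 exact, 2 normalized, 3 substring, 4 token overlap >= 2) and keeps the lexicographically best (tier, -score) pair with earliest-index tie-breaking.
import Mathlib
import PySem

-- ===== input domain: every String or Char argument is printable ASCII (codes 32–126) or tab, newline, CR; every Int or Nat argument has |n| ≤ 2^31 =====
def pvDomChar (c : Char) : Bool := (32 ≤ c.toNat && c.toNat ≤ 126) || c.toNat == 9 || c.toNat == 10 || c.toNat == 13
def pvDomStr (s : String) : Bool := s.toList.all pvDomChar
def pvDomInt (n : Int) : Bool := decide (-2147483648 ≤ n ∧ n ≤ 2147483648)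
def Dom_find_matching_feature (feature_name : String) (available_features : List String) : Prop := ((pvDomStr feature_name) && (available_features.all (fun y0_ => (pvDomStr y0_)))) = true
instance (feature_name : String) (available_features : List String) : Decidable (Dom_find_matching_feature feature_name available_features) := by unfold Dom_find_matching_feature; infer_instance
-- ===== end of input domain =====

-- B replaces A's five sequential early-return scans with a single scored selection pass
-- (objective: alternative decomposition, same asymptotic cost).

-- shared tiny wrappers for the Python subexpressions both versions use
-- str(x).lower().strip()
def pvCanon (s : String) : String := PySem.Str.strip (PySem.Str.lower s)
-- s.replace("_", "").replace(" ", "")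
def pvNoSep (s : String) : String := PySem.Str.replace (PySem.Str.replace s "_" "") " " ""
-- set(s.split("_"))  (separator is the nonempty literal "_", so split? is always some)
def pvTokens (s : String) : PySem.Set String := PySem.Set.ofList ((PySem.Str.split? s "_").getD [])

-- ===== PORT A =====
-- STAGE 1: exact match (case-insensitive)
def fmfStage1 (t : String) : List String → Option String
  | [] => none
  | f :: rest => if pvCanon f = t then some f else fmfStage1 t rest

-- STAGE 2: normalized match (remove underscores/spaces)
def fmfStage2 (tn : String) : List String → Option String
  | [] => none
  | f :: rest => if tn = pvNoSep (pvCanon f) then some f else fmfStage2 tn rest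

-- STAGE 3: partial match (substring)
def fmfStage3 (t : String) : List String → Option String
  | [] => none
  | f :: rest =>
      let fl := pvCanon f
      if (PySem.Str.isIn t fl || PySem.Str.isIn fl t) = true then
        (if PySem.Str.isIn t fl = true then some f else fmfStage3 t rest)
      else fmfStage3 t rest

-- STAGE 4: token-based match loop (state = (best_match, best_score))
def fmfStage4 (tt : PySem.Set String) (l : List String) : Option String × Int :=
  l.foldl (fun (st : Option String × Int) f =>
      if st.2 < PySem.Set.len (PySem.Set.inter tt (pvTokens (pvCanon f)))
          ∧ 2 ≤ PySem.Set.len (PySem.Set.inter tt (pvTokens (pvCanon f)))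
      then (some f, PySem.Set.len (PySem.Set.inter tt (pvTokens (pvCanon f)))) else st)
    (none, 0)

def find_matching_feature (feature_name : String) (available_features : List String) : Option String :=
  if feature_name = "" ∨ available_features = [] then none
  else
    let t := pvCanon feature_name
    match fmfStage1 t available_features with
    | some f => some f
    | none =>
      match fmfStage2 (pvNoSep t) available_features with
      | some f => some f
      | none =>
        match fmfStage3 t available_features with
        | some f => some f
        | none =>
          match (fmfStage4 (pvTokens t) available_features).1 with
          | some f => if f = "" then none else some f   -- Python's `if best_match:` (falsy "" → None)
          | none => none

-- ===== PORT B =====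
-- best tier of a candidate: 1 exact, 2 normalized, 3 substring, 4 token overlap ≥ 2 (key = -score)
def fmfRank (t tn : String) (tt : PySem.Set String) (f : String) : Option (Nat × Int) :=
  if pvCanon f = t then some (1, 0)
  else if pvNoSep (pvCanon f) = tn then some (2, 0)
  else if PySem.Str.isIn t (pvCanon f) = true then some (3, 0)
  else if PySem.Set.len (PySem.Set.inter tt (pvTokens (pvCanon f))) < 2 then none
  else some (4, -(PySem.Set.len (PySem.Set.inter tt (pvTokens (pvCanon f)))))

-- Python's lexicographic `rank < best[0]`
def fmfRankLt (p q : Nat × Int) : Bool := p.1 < q.1 || (p.1 == q.1 && p.2 < q.2)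

def find_matching_feature_alt (feature_name : String) (available_features : List String) : Option String :=
  if feature_name = "" ∨ available_features = [] then none
  else
    let t := pvCanon feature_name
    let tn := pvNoSep t
    let tt := pvTokens t
    let best := available_features.foldl
      (fun (b : Option ((Nat × Int) × String)) f =>
        match fmfRank t tn tt f with
        | none => b
        | some r =>
          match b with
          | none => some (r, f)
          | some (br, bf) => if fmfRankLt r br then some (r, f) else some (br, bf)) none
    match best with
    | some (_, f) => some f
    | none => none

-- ===== PRECONDITION & SPEC =====
def Spec_find_matching_feature (feature_name : String) (available_features : List String) (out : Option String) : Prop := out = find_matching_feature_alt feature_name available_features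
instance (feature_name : String) (available_features : List String) (out : Option String) : Decidable (Spec_find_matching_feature feature_name available_features out) := by unfold Spec_find_matching_feature; infer_instance

-- ===== CLAIM (what is proved, stated in full; the proofs are below) =====
def Claim_equal_find_matching_feature : Prop := ∀ (feature_name : String) (available_features : List String), Dom_find_matching_feature feature_name available_features → Spec_find_matching_feature feature_name available_features (find_matching_feature feature_name available_features)

-- ===== LEMMAS AND PROOFS =====

-- merge two candidate states, preferring the left one on rank ties (= earlier list position)
def fmfMerge : Option ((Nat × Int) × String) → Option ((Nat × Int) × String) → Option ((Nat × Int) × String)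
  | a, none => a
  | none, some y => some y
  | some x, some y => if fmfRankLt y.1 x.1 then some y else some x

-- right-recursion form of B's selection loop
def fmfBestOf (t tn : String) (tt : PySem.Set String) : List String → Option ((Nat × Int) × String)
  | [] => none
  | f :: rest => fmfMerge ((fmfRank t tn tt f).map (fun r => (r, f))) (fmfBestOf t tn tt rest)

theorem fmfMerge_none_left (b : Option ((Nat × Int) × String)) : fmfMerge none b = b := by
  cases b <;> rfl

theorem fmfRankLt_trans {a b c : Nat × Int} (h1 : fmfRankLt a b = true)
    (h2 : fmfRankLt b c = true) : fmfRankLt a c = true := by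
  obtain ⟨a1, a2⟩ := a; obtain ⟨b1, b2⟩ := b; obtain ⟨c1, c2⟩ := c
  simp [fmfRankLt] at *; omega

theorem fmfRankLt_negtrans {a b c : Nat × Int} (h1 : fmfRankLt a b = false)
    (h2 : fmfRankLt b c = false) : fmfRankLt a c = false := by
  obtain ⟨a1, a2⟩ := a; obtain ⟨b1, b2⟩ := b; obtain ⟨c1, c2⟩ := c
  simp [fmfRankLt] at *; omega

theorem fmfMerge_none_right (a : Option ((Nat × Int) × String)) : fmfMerge a none = a := rfl

theorem fmfMerge_some_some (x y : (Nat × Int) × String) :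
    fmfMerge (some x) (some y) = if fmfRankLt y.1 x.1 = true then some y else some x := rfl

theorem fmfMerge_assoc (a b c : Option ((Nat × Int) × String)) :
    fmfMerge (fmfMerge a b) c = fmfMerge a (fmfMerge b c) := by
  cases a with
  | none => simp only [fmfMerge_none_left]
  | some x => cases b with
    | none => simp only [fmfMerge_none_right, fmfMerge_none_left]
    | some y => cases c with
      | none => simp only [fmfMerge_none_right]
      | some z =>
        rw [fmfMerge_some_some x y]
        by_cases hyx : fmfRankLt y.1 x.1 = true
        · rw [if_pos hyx, fmfMerge_some_some y z]
          by_cases hzy : fmfRankLt z.1 y.1 = true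
          · rw [if_pos hzy, fmfMerge_some_some x z, if_pos (fmfRankLt_trans hzy hyx)]
          · rw [if_neg hzy, fmfMerge_some_some x y, if_pos hyx]
        · rw [if_neg hyx, fmfMerge_some_some y z]
          by_cases hzy : fmfRankLt z.1 y.1 = true
          · rw [if_pos hzy]
          · have hzx : fmfRankLt z.1 x.1 = false :=
              fmfRankLt_negtrans (Bool.eq_false_iff.mpr hzy) (Bool.eq_false_iff.mpr hyx)
            rw [if_neg hzy, fmfMerge_some_some x y, if_neg hyx, fmfMerge_some_some x z,
              if_neg (Bool.eq_false_iff.mp hzx)]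

theorem fmfFold_eq_bestOf (t tn : String) (tt : PySem.Set String) (l : List String) :
    ∀ acc, l.foldl
      (fun (b : Option ((Nat × Int) × String)) f =>
        match fmfRank t tn tt f with
        | none => b
        | some r =>
          match b with
          | none => some (r, f)
          | some (br, bf) => if fmfRankLt r br then some (r, f) else some (br, bf)) acc
      = fmfMerge acc (fmfBestOf t tn tt l) := by
  induction l with
  | nil => intro acc; rfl
  | cons f rest ih =>
    intro acc
    have hstep : (match fmfRank t tn tt f with
        | none => acc
        | some r =>
          match acc with
          | none => some (r, f)
          | some (br, bf) => if fmfRankLt r br then some (r, f) else some (br, bf))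
        = fmfMerge acc ((fmfRank t tn tt f).map (fun r => (r, f))) := by
      cases fmfRank t tn tt f <;> cases acc <;> rfl
    simp only [List.foldl_cons, hstep, ih, fmfBestOf, fmfMerge_assoc]

theorem fmfBestOf_mem {t tn : String} {tt : PySem.Set String} {l : List String}
    {r : Nat × Int} {g : String} (h : fmfBestOf t tn tt l = some (r, g)) :
    g ∈ l ∧ fmfRank t tn tt g = some r := by
  induction l with
  | nil => simp [fmfBestOf] at h
  | cons f rest ih =>
    simp only [fmfBestOf] at h
    rcases hf : fmfRank t tn tt f with _ | q <;> rw [hf] at h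
    · rcases hb : fmfBestOf t tn tt rest with _ | ⟨q', g'⟩ <;> rw [hb] at h
      · simp [fmfMerge] at h
      · simp only [Option.map_none, fmfMerge_none_left] at h
        rcases h with ⟨rfl⟩ | h
        · rcases ih hb with ⟨hm, hr⟩
          exact ⟨List.mem_cons_of_mem _ (ih hb).1, (ih hb).2⟩
    · rcases hb : fmfBestOf t tn tt rest with _ | ⟨q', g'⟩ <;> rw [hb] at h
      · simp only [Option.map_some, fmfMerge] at h
        injection h with h; injection h with h1 h2
        subst h1; subst h2; exact ⟨List.mem_cons_self, hf⟩
      · simp only [Option.map_some, fmfMerge] at h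
        split_ifs at h <;> injection h with h <;> injection h with h1 h2 <;>
          subst h1 <;> subst h2
        · exact ⟨List.mem_cons_of_mem _ (ih hb).1, (ih hb).2⟩
        · exact ⟨List.mem_cons_self, hf⟩

-- every rank value is (1,0), (2,0), (3,0) or (4, ≤ -2)
theorem fmfRank_values {t tn : String} {tt : PySem.Set String} {g : String} {q : Nat × Int}
    (h : fmfRank t tn tt g = some q) :
    q = (1, 0) ∨ q = (2, 0) ∨ q = (3, 0) ∨ (q.1 = 4 ∧ q.2 ≤ -2) := by
  unfold fmfRank at h
  by_cases h1 : pvCanon g = t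
  · rw [if_pos h1] at h; injection h with h; subst h; exact Or.inl rfl
  · rw [if_neg h1] at h
    by_cases h2 : pvNoSep (pvCanon g) = tn
    · rw [if_pos h2] at h; injection h with h; subst h; exact Or.inr (Or.inl rfl)
    · rw [if_neg h2] at h
      by_cases h3 : PySem.Str.isIn t (pvCanon g) = true
      · rw [if_pos h3] at h; injection h with h; subst h; exact Or.inr (Or.inr (Or.inl rfl))
      · rw [if_neg h3] at h
        by_cases h4 : PySem.Set.len (PySem.Set.inter tt (pvTokens (pvCanon g))) < 2
        · rw [if_pos h4] at h; exact absurd h (by simp)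
        · rw [if_neg h4] at h; injection h with h; subst h
          refine Or.inr (Or.inr (Or.inr ⟨rfl, ?_⟩))
          show -(PySem.Set.len (PySem.Set.inter tt (pvTokens (pvCanon g)))) ≤ -2
          simp only [PySem.Set.len] at h4 ⊢
          omega

theorem fmfRank_exact {t tn : String} {tt : PySem.Set String} {g : String}
    (h : pvCanon g = t) : fmfRank t tn tt g = some (1, 0) := by
  unfold fmfRank; rw [if_pos h]

theorem fmfRank_norm {t tn : String} {tt : PySem.Set String} {g : String}
    (h1 : ¬ pvCanon g = t) (h2 : pvNoSep (pvCanon g) = tn) :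
    fmfRank t tn tt g = some (2, 0) := by
  unfold fmfRank; rw [if_neg h1, if_pos h2]

theorem fmfRank_sub {t tn : String} {tt : PySem.Set String} {g : String}
    (h1 : ¬ pvCanon g = t) (h2 : ¬ pvNoSep (pvCanon g) = tn)
    (h3 : PySem.Str.isIn t (pvCanon g) = true) :
    fmfRank t tn tt g = some (3, 0) := by
  unfold fmfRank; rw [if_neg h1, if_neg h2, if_pos h3]

theorem fmfRank_tok {t tn : String} {tt : PySem.Set String} {g : String}
    (h1 : ¬ pvCanon g = t) (h2 : ¬ pvNoSep (pvCanon g) = tn)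
    (h3 : ¬ PySem.Str.isIn t (pvCanon g) = true) :
    fmfRank t tn tt g =
      (if PySem.Set.len (PySem.Set.inter tt (pvTokens (pvCanon g))) < 2 then none
       else some (4, -(PySem.Set.len (PySem.Set.inter tt (pvTokens (pvCanon g)))))) := by
  unfold fmfRank; rw [if_neg h1, if_neg h2, if_neg h3]

theorem fmfRank_ge_two {t tn : String} {tt : PySem.Set String} {g : String} {q : Nat × Int}
    (hne : ¬ pvCanon g = t) (h : fmfRank t tn tt g = some q) : 2 ≤ q.1 := by
  unfold fmfRank at h
  rw [if_neg hne] at h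
  by_cases h2 : pvNoSep (pvCanon g) = tn
  · rw [if_pos h2] at h; injection h with h; subst h; decide
  · rw [if_neg h2] at h
    by_cases h3 : PySem.Str.isIn t (pvCanon g) = true
    · rw [if_pos h3] at h; injection h with h; subst h; decide
    · rw [if_neg h3] at h
      by_cases h4 : PySem.Set.len (PySem.Set.inter tt (pvTokens (pvCanon g))) < 2
      · rw [if_pos h4] at h; exact absurd h (by simp)
      · rw [if_neg h4] at h; injection h with h; subst h
        show 2 ≤ (4 : Nat); decide

theorem fmfRank_ge_three {t tn : String} {tt : PySem.Set String} {g : String} {q : Nat × Int}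
    (hne : ¬ pvCanon g = t) (hnm : ¬ pvNoSep (pvCanon g) = tn)
    (h : fmfRank t tn tt g = some q) : 3 ≤ q.1 := by
  have h' := h; unfold fmfRank at h'
  rw [if_neg hne, if_neg hnm] at h'
  by_cases h3 : PySem.Str.isIn t (pvCanon g) = true
  · rw [if_pos h3] at h'; injection h' with h'; subst h'; decide
  · rw [if_neg h3] at h'
    by_cases h4 : PySem.Set.len (PySem.Set.inter tt (pvTokens (pvCanon g))) < 2
    · rw [if_pos h4] at h'; exact absurd h' (by simp)
    · rw [if_neg h4] at h'; injection h' with h'; subst h'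
      show 3 ≤ (4 : Nat); decide

-- ---- stage-emptiness lemmas ----
theorem fmfStage1_none {t : String} {l : List String}
    (h : ∀ f ∈ l, ¬ pvCanon f = t) : fmfStage1 t l = none := by
  induction l with
  | nil => rfl
  | cons f rest ih =>
    simp only [fmfStage1, if_neg (h f List.mem_cons_self)]
    exact ih fun g hg => h g (List.mem_cons_of_mem _ hg)

theorem fmfStage2_none {tn : String} {l : List String}
    (h : ∀ f ∈ l, ¬ pvNoSep (pvCanon f) = tn) : fmfStage2 tn l = none := by
  induction l with
  | nil => rfl
  | cons f rest ih =>
    have : ¬ tn = pvNoSep (pvCanon f) := fun he => h f List.mem_cons_self he.symm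
    simp only [fmfStage2, if_neg this]
    exact ih fun g hg => h g (List.mem_cons_of_mem _ hg)

theorem fmfStage3_none {t : String} {l : List String}
    (h : ∀ f ∈ l, ¬ PySem.Str.isIn t (pvCanon f) = true) : fmfStage3 t l = none := by
  induction l with
  | nil => rfl
  | cons f rest ih =>
    have hf : ¬ PySem.Str.isIn t (pvCanon f) = true := h f List.mem_cons_self
    have ih' : fmfStage3 t rest = none := ih fun g hg => h g (List.mem_cons_of_mem _ hg)
    simp only [fmfStage3]
    by_cases hor : (PySem.Str.isIn t (pvCanon f) || PySem.Str.isIn (pvCanon f) t) = true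
    · rw [if_pos hor, if_neg hf, ih']
    · rw [if_neg hor, ih']

-- ---- tier-1 case ----
theorem fmfTier1 {t tn : String} {tt : PySem.Set String} {l : List String}
    (hex : ∃ f ∈ l, pvCanon f = t) :
    ∃ g, fmfStage1 t l = some g ∧ fmfBestOf t tn tt l = some ((1, 0), g) := by
  induction l with
  | nil => simp at hex
  | cons f rest ih =>
    by_cases hf : pvCanon f = t
    · refine ⟨f, by simp [fmfStage1, hf], ?_⟩
      simp only [fmfBestOf, fmfRank_exact hf, Option.map_some]
      rcases hb : fmfBestOf t tn tt rest with _ | ⟨q, g'⟩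
      · rfl
      · have hq := (fmfBestOf_mem hb).2
        have hv := fmfRank_values hq
        have : fmfRankLt q (1, 0) = false := by
          rcases hv with rfl | rfl | rfl | ⟨h4, _⟩ <;> simp [fmfRankLt] <;> omega
        simp [fmfMerge, this]
    · have hex' : ∃ g ∈ rest, pvCanon g = t := by
        rcases hex with ⟨g, hg, he⟩
        rcases List.mem_cons.mp hg with rfl | hg'
        · exact absurd he hf
        · exact ⟨g, hg', he⟩
      rcases ih hex' with ⟨g, hs, hb⟩
      refine ⟨g, by simp [fmfStage1, hf, hs], ?_⟩
      simp only [fmfBestOf, hb]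
      rcases hr : fmfRank t tn tt f with _ | q
      · rfl
      · have h2 : 2 ≤ q.1 := fmfRank_ge_two hf hr
        have : fmfRankLt (1, 0) q = true := by simp [fmfRankLt]; omega
        simp [fmfMerge, this]

-- ---- tier-2 case ----
theorem fmfTier2 {t tn : String} {tt : PySem.Set String} {l : List String}
    (hnoex : ∀ f ∈ l, ¬ pvCanon f = t)
    (hnm : ∃ f ∈ l, pvNoSep (pvCanon f) = tn) :
    ∃ g, fmfStage2 tn l = some g ∧ fmfBestOf t tn tt l = some ((2, 0), g) := by
  induction l with
  | nil => simp at hnm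
  | cons f rest ih =>
    have hfex : ¬ pvCanon f = t := hnoex f List.mem_cons_self
    have hnoex' : ∀ g ∈ rest, ¬ pvCanon g = t := fun g hg => hnoex g (List.mem_cons_of_mem _ hg)
    by_cases hf : pvNoSep (pvCanon f) = tn
    · refine ⟨f, by simp [fmfStage2, hf.symm], ?_⟩
      simp only [fmfBestOf, fmfRank_norm hfex hf, Option.map_some]
      rcases hb : fmfBestOf t tn tt rest with _ | ⟨q, g'⟩
      · rfl
      · obtain ⟨hmem, hq⟩ := fmfBestOf_mem hb
        have h2 : 2 ≤ q.1 := fmfRank_ge_two (hnoex' g' hmem) hq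
        have hv := fmfRank_values hq
        have : fmfRankLt q (2, 0) = false := by
          rcases hv with rfl | rfl | rfl | ⟨h4, _⟩ <;> simp_all [fmfRankLt] <;> omega
        simp [fmfMerge, this]
    · have hnm' : ∃ g ∈ rest, pvNoSep (pvCanon g) = tn := by
        rcases hnm with ⟨g, hg, he⟩
        rcases List.mem_cons.mp hg with rfl | hg'
        · exact absurd he hf
        · exact ⟨g, hg', he⟩
      rcases ih hnoex' hnm' with ⟨g, hs, hb⟩
      have : ¬ tn = pvNoSep (pvCanon f) := fun he => hf he.symm
      refine ⟨g, by simp [fmfStage2, this, hs], ?_⟩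
      simp only [fmfBestOf, hb]
      rcases hr : fmfRank t tn tt f with _ | q
      · rfl
      · have h3 : 3 ≤ q.1 := fmfRank_ge_three hfex hf hr
        have : fmfRankLt (2, 0) q = true := by simp [fmfRankLt]; omega
        simp [fmfMerge, this]

-- ---- tier-3 case ----
theorem fmfTier3 {t tn : String} {tt : PySem.Set String} {l : List String}
    (hnoex : ∀ f ∈ l, ¬ pvCanon f = t)
    (hnonm : ∀ f ∈ l, ¬ pvNoSep (pvCanon f) = tn)
    (hsub : ∃ f ∈ l, PySem.Str.isIn t (pvCanon f) = true) :
    ∃ g, fmfStage3 t l = some g ∧ fmfBestOf t tn tt l = some ((3, 0), g) := by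
  induction l with
  | nil => simp at hsub
  | cons f rest ih =>
    have hfex : ¬ pvCanon f = t := hnoex f List.mem_cons_self
    have hfnm : ¬ pvNoSep (pvCanon f) = tn := hnonm f List.mem_cons_self
    have hnoex' : ∀ g ∈ rest, ¬ pvCanon g = t := fun g hg => hnoex g (List.mem_cons_of_mem _ hg)
    have hnonm' : ∀ g ∈ rest, ¬ pvNoSep (pvCanon g) = tn := fun g hg => hnonm g (List.mem_cons_of_mem _ hg)
    by_cases hf : PySem.Str.isIn t (pvCanon f) = true
    · refine ⟨f, ?_, ?_⟩
      · simp only [fmfStage3]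
        rw [if_pos (show (PySem.Str.isIn t (pvCanon f) || PySem.Str.isIn (pvCanon f) t) = true by
          rw [hf, Bool.true_or]), if_pos hf]
      simp only [fmfBestOf, fmfRank_sub hfex hfnm hf, Option.map_some]
      rcases hb : fmfBestOf t tn tt rest with _ | ⟨q, g'⟩
      · rfl
      · obtain ⟨hmem, hq⟩ := fmfBestOf_mem hb
        have h3 : 3 ≤ q.1 := fmfRank_ge_three (hnoex' g' hmem) (hnonm' g' hmem) hq
        have hv := fmfRank_values hq
        have : fmfRankLt q (3, 0) = false := by
          rcases hv with rfl | rfl | rfl | ⟨h4, _⟩ <;> simp_all [fmfRankLt] <;> omega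
        simp [fmfMerge, this]
    · have hsub' : ∃ g ∈ rest, PySem.Str.isIn t (pvCanon g) = true := by
        rcases hsub with ⟨g, hg, he⟩
        rcases List.mem_cons.mp hg with rfl | hg'
        · exact absurd he hf
        · exact ⟨g, hg', he⟩
      rcases ih hnoex' hnonm' hsub' with ⟨g, hs, hb⟩
      have hs3 : fmfStage3 t (f :: rest) = fmfStage3 t rest := by
        simp only [fmfStage3]
        by_cases hor : (PySem.Str.isIn t (pvCanon f) || PySem.Str.isIn (pvCanon f) t) = true
        · rw [if_pos hor, if_neg hf]
        · rw [if_neg hor]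
      refine ⟨g, by rw [hs3, hs], ?_⟩
      simp only [fmfBestOf, hb]
      rcases hr : fmfRank t tn tt f with _ | q
      · rfl
      · have h4 : q.1 = 4 := by
          rw [fmfRank_tok hfex hfnm hf] at hr
          by_cases hlt : PySem.Set.len (PySem.Set.inter tt (pvTokens (pvCanon f))) < 2
          · rw [if_pos hlt] at hr; exact (nomatch hr)
          · rw [if_neg hlt] at hr
            obtain rfl : q = (4, -(PySem.Set.len (PySem.Set.inter tt (pvTokens (pvCanon f))))) :=
              (Option.some.inj hr).symm
            rfl
        have : fmfRankLt (3, 0) q = true := by simp [fmfRankLt]; omega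
        simp [fmfMerge, this]

-- ---- tier-4 case: relate A's stage-4 loop state to B's candidate state ----
def fmfRel (st : Option String × Int) (acc : Option ((Nat × Int) × String)) : Prop :=
  (st = (none, 0) ∧ acc = none) ∨
  (∃ g s, st = (some g, s) ∧ 2 ≤ s ∧ acc = some ((4, -s), g))

theorem fmfTier4 {t tn : String} {tt : PySem.Set String} (l : List String)
    (hnoex : ∀ f ∈ l, ¬ pvCanon f = t)
    (hnonm : ∀ f ∈ l, ¬ pvNoSep (pvCanon f) = tn)
    (hnosub : ∀ f ∈ l, ¬ PySem.Str.isIn t (pvCanon f) = true) :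
    ∀ st acc, fmfRel st acc →
      fmfRel (l.foldl (fun (st : Option String × Int) f =>
          let score := PySem.Set.len (PySem.Set.inter tt (pvTokens (pvCanon f)))
          if st.2 < score ∧ 2 ≤ score then (some f, score) else st) st)
        (fmfMerge acc (fmfBestOf t tn tt l)) := by
  induction l with
  | nil =>
    intro st acc h
    simpa [fmfBestOf, fmfMerge] using h
  | cons f rest ih =>
    intro st acc h
    have hnoex' : ∀ g ∈ rest, ¬ pvCanon g = t := fun g hg => hnoex g (List.mem_cons_of_mem _ hg)
    have hnonm' : ∀ g ∈ rest, ¬ pvNoSep (pvCanon g) = tn := fun g hg => hnonm g (List.mem_cons_of_mem _ hg)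
    have hnosub' : ∀ g ∈ rest, ¬ PySem.Str.isIn t (pvCanon g) = true := fun g hg => hnosub g (List.mem_cons_of_mem _ hg)
    have hrf := fmfRank_tok (hnoex f List.mem_cons_self) (hnonm f List.mem_cons_self)
      (hnosub f List.mem_cons_self) (tt := tt)
    simp only [fmfBestOf, List.foldl_cons, ← fmfMerge_assoc]
    apply ih hnoex' hnonm' hnosub'
    -- one loop step preserves the relation
    set S := PySem.Set.len (PySem.Set.inter tt (pvTokens (pvCanon f))) with hS
    by_cases hs : S < 2
    · rw [hrf, if_pos hs]
      have hc : ¬ (st.2 < S ∧ 2 ≤ S) := by omega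
      rw [if_neg hc]
      have hm : (Option.map (fun r => (r, f)) (none : Option (Nat × Int))) = none := rfl
      rw [hm, fmfMerge_none_right]
      exact h
    · push_neg at hs
      rw [hrf, if_neg (show ¬ S < 2 by omega)]
      have hm : (Option.map (fun r => (r, f)) (some ((4 : Nat), -S))) = some (((4 : Nat), -S), f) := rfl
      rw [hm]
      rcases h with ⟨hst, hacc⟩ | ⟨g, s, hst, hs2, hacc⟩
      · subst hacc; subst hst
        rw [fmfMerge_none_left,
          if_pos (show ((none : Option String), (0 : Int)).2 < S ∧ 2 ≤ S from ⟨by omega, hs⟩)]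
        exact Or.inr ⟨f, S, rfl, hs, rfl⟩
      · subst hacc; subst hst
        rw [fmfMerge_some_some]
        by_cases hlt : s < S
        · rw [if_pos (show ((some g : Option String), s).2 < S ∧ 2 ≤ S from ⟨hlt, hs⟩),
            if_pos (show fmfRankLt ((4, -S), f).1 ((4, -s), g).1 = true by simp [fmfRankLt]; omega)]
          exact Or.inr ⟨f, S, rfl, hs, rfl⟩
        · rw [if_neg (show ¬ (((some g : Option String), s).2 < S ∧ 2 ≤ S) from fun hc => hlt hc.1),
            if_neg (show ¬ fmfRankLt ((4, -S), f).1 ((4, -s), g).1 = true by simp [fmfRankLt]; omega)]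
          exact Or.inr ⟨g, s, rfl, hs2, rfl⟩

-- a candidate with token score ≥ 2 is not the empty string
theorem fmfScore_ne_empty {tt : PySem.Set String} (htt : tt.Nodup)
    (h : 2 ≤ PySem.Set.len (PySem.Set.inter tt (pvTokens (pvCanon "")))) : False := by
  have hc : pvCanon "" = "" := by decide
  rw [hc] at h
  have htok : pvTokens "" = [""] := by decide
  rw [htok] at h
  have : PySem.Set.inter tt [""] = tt.filter (fun x => List.contains [""] x) := rfl
  rw [this] at h
  have hfc : tt.filter (fun x => List.contains [""] x) = tt.filter (fun x => x == "") := by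
    apply List.filter_congr; intro x hx
    show ([""].contains x) = (x == "")
    simp
    rw [beq_eq_decide]
  have hle : (tt.filter (fun x => List.contains [""] x)).length ≤ tt.count "" := by
    rw [hfc, List.count, List.countP_eq_length_filter]
  have hcount : tt.count "" ≤ 1 := List.nodup_iff_count_le_one.mp htt _
  simp only [PySem.Set.len] at h
  omega

-- ===== VERDICT (by name: the statement is the Claim_ definition above) =====
theorem find_matching_feature_spec : Claim_equal_find_matching_feature := by
  intro fn l _
  unfold Spec_find_matching_feature find_matching_feature find_matching_feature_alt
  by_cases hguard : fn = "" ∨ l = []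
  · simp [hguard]
  · simp only [if_neg hguard]
    set t := pvCanon fn with ht
    set tn := pvNoSep t with htn
    set tt := pvTokens t with htt
    rw [fmfFold_eq_bestOf t tn tt l none, fmfMerge_none_left]
    by_cases hex : ∃ f ∈ l, pvCanon f = t
    · rcases fmfTier1 (tn := tn) (tt := tt) hex with ⟨g, h1, hb⟩
      rw [h1, hb]
    · push_neg at hex
      rw [fmfStage1_none hex]
      by_cases hnm : ∃ f ∈ l, pvNoSep (pvCanon f) = tn
      · rcases fmfTier2 (tt := tt) hex hnm with ⟨g, h2, hb⟩
        rw [h2, hb]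
      · push_neg at hnm
        rw [fmfStage2_none hnm]
        by_cases hsub : ∃ f ∈ l, PySem.Str.isIn t (pvCanon f) = true
        · rcases fmfTier3 (tt := tt) hex hnm hsub with ⟨g, h3, hb⟩
          rw [h3, hb]
        · push_neg at hsub
          rw [fmfStage3_none hsub]
          have hrel := fmfTier4 (tt := tt) l hex hnm hsub (none, 0) none (Or.inl ⟨rfl, rfl⟩)
          rw [fmfMerge_none_left] at hrel
          unfold fmfStage4
          rcases hrel with ⟨hst, hacc⟩ | ⟨g, s, hst, hs2, hacc⟩
          · rw [hst, hacc]
          · rw [hst, hacc]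
            obtain ⟨hgmem, hrg⟩ := fmfBestOf_mem hacc
            have httnd : List.Nodup tt := by
              rw [htt]; unfold pvTokens; exact PySem.Set.nodup_ofList _
            have hgne : ¬ g = "" := by
              intro hge
              have hrt := fmfRank_tok (hex g hgmem) (hnm g hgmem) (hsub g hgmem) (tt := tt)
              rw [hrt] at hrg
              by_cases hlt : PySem.Set.len (PySem.Set.inter tt (pvTokens (pvCanon g))) < 2
              · rw [if_pos hlt] at hrg; exact (nomatch hrg)
              · push_neg at hlt
                subst hge
                exact fmfScore_ne_empty httnd hlt
            simp [hgne]
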